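-- pv_equiv track=rewrite | github.com/xinwang0312/AOC2017 | day09/solution.py | parse_stream
-- ===== SOURCE A (Python) =====
-- from typing import Deque
--
-- def parse_stream(stream: str):
--     ignore = False
--     stack = Deque()
--     num_garbage_start = 0  # num of <
--
--     for s in stream:
--         if ignore:
--             ignore = False
--             continue
--
--         if s == "!":
--             ignore = True
--         elif s in ["{", "}"]:
--             stack.append(s)
--         elif s in ["<"]:
--             stack.append(s)
--             num_garbage_start += 1
--         elif s == ">":
--             while num_garbage_start > 0:
--                 last = stack.pop()
--                 if last == '<':
--                     num_garbage_start -= 1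
--         else:
--             pass
--     return "".join(stack)
-- ===== SOURCE B (Python) =====
-- def parse_stream(stream: str):
--     result = []
--     ignore = False
--     garbage = False
--     mark = 0
--     for s in stream:
--         if ignore:
--             ignore = False
--         elif s == "!":
--             ignore = True
--         elif s in "{}":
--             result.append(s)
--         elif s == "<":
--             if not garbage:
--                 mark = len(result)
--                 garbage = True
--             result.append(s)
--         elif s == ">":
--             if garbage:
--                 del result[mark:]
--                 garbage = False
--     return "".join(result)
-- ===== Notes on version B (the rewrite author's own statement) =====
-- stated objective: simpler
-- what changed: Replaces A's '<'-counter plus amortized pop-while-loop on a deque with a boolean in-garbage flag and a remembered truncation index: on '>' the whole garbage run is removed by one slice delete instead of popping element by element.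
import Mathlib
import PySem

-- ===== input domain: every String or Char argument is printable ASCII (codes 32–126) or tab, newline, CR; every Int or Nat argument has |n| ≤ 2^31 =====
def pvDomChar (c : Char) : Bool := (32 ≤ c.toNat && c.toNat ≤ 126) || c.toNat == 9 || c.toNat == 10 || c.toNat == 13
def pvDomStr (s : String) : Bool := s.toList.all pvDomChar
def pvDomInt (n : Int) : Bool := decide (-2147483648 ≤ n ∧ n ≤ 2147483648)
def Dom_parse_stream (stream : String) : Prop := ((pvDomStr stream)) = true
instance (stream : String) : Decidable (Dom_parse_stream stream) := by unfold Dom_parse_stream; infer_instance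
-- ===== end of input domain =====

-- B replaces A's '<'-counter + pop-while-loop with an in-garbage flag and a remembered
-- truncation index (one slice delete on '>'); same return value, objective: simpler.

-- ===== PORT A =====
-- A's inner `while num_garbage_start > 0: last = stack.pop(); …` loop.
-- The stack is modelled top-first (push = cons), so `.pop()` is taking the head;
-- the final `"".join(stack)` therefore joins the REVERSE of this list.
-- The `[] `case with n > 0 is unreachable in A (n counts '<' still on the stack);
-- Python would raise IndexError there.
def parse_streamPopLoop (stack : List Char) (n : Int) : List Char × Int :=
  if n > 0 then
    match stack with
    | [] => ([], n)
    | last :: rest =>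
      if last = '<' then parse_streamPopLoop rest (n - 1) else parse_streamPopLoop rest n
  else (stack, n)
termination_by stack.length
decreasing_by all_goals simp

def parse_streamStepA (acc : Bool × List Char × Int) (s : Char) : Bool × List Char × Int :=
  let (ignore, stack, n) := acc
  if ignore then (false, stack, n)
  else if s = '!' then (true, stack, n)
  else if s = '{' ∨ s = '}' then (false, s :: stack, n)
  else if s = '<' then (false, s :: stack, n + 1)
  else if s = '>' then
    let r := parse_streamPopLoop stack n
    (false, r.1, r.2)
  else (false, stack, n)

def parse_stream (stream : String) : String :=
  let st := stream.toList.foldl parse_streamStepA (false, [], 0)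
  String.mk st.2.1.reverse   -- "".join(stack): stack is top-first, join in insertion order

-- ===== PORT B =====
def parse_streamStepB (acc : Bool × List Char × Bool × Nat) (s : Char) :
    Bool × List Char × Bool × Nat :=
  let (ignore, result, garbage, mark) := acc
  if ignore then (false, result, garbage, mark)
  else if s = '!' then (true, result, garbage, mark)
  else if s = '{' ∨ s = '}' then (false, result ++ [s], garbage, mark)
  else if s = '<' then
    if garbage then (false, result ++ [s], garbage, mark)
    else (false, result ++ [s], true, result.length)   -- mark = len(result) before append
  else if s = '>' then
    if garbage then (false, result.take mark, false, mark)   -- del result[mark:]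
    else (false, result, garbage, mark)
  else (false, result, garbage, mark)

def parse_stream_alt (stream : String) : String :=
  let st := stream.toList.foldl parse_streamStepB (false, [], false, 0)
  String.mk st.2.1

-- ===== PRECONDITION & SPEC =====
def Spec_parse_stream (stream : String) (out : String) : Prop := out = parse_stream_alt stream
instance (stream : String) (out : String) : Decidable (Spec_parse_stream stream out) := by unfold Spec_parse_stream; infer_instance

-- ===== CLAIM (what is proved, stated in full; the proofs are below) =====
def Claim_equal_parse_stream : Prop := ∀ (stream : String), Dom_parse_stream stream → Spec_parse_stream stream (parse_stream stream)

-- ===== LEMMAS AND PROOFS =====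

-- Invariant tying A's (ignore, stack, n) to B's (ignore, result, garbage, mark):
-- same ignore flag; stack is result reversed; n counts the '<' in result;
-- garbage iff result contains a '<'; when garbage, mark is the index of the first '<'.
def parse_streamInv (a : Bool × List Char × Int) (b : Bool × List Char × Bool × Nat) : Prop :=
  a.1 = b.1 ∧ a.2.1 = b.2.1.reverse ∧ a.2.2 = (b.2.1.count '<' : Int) ∧
  (b.2.2.1 = false → b.2.1.count '<' = 0) ∧
  (b.2.2.1 = true → ∃ p q, b.2.1 = p ++ '<' :: q ∧ p.count '<' = 0 ∧ b.2.2.2 = p.length)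

theorem parse_streamPopLoop_spec (r p : List Char) (_hp : p.count '<' = 0) :
    parse_streamPopLoop (r ++ '<' :: p.reverse) ((r.count '<' : Int) + 1) = (p.reverse, 0) := by
  induction r with
  | nil =>
    rw [parse_streamPopLoop.eq_def]
    norm_num
    rw [parse_streamPopLoop.eq_def]
    norm_num
  | cons c r ih =>
    rw [parse_streamPopLoop.eq_def]
    have hpos : (0:Int) < ((c :: r).count '<' : Int) + 1 := by positivity
    rw [if_pos hpos]
    simp only [List.cons_append]
    by_cases hc : c = '<'
    · subst hc
      simp only [List.count_cons_self]
      have : ((r.count '<' + 1 : Nat) : Int) + 1 - 1 = (r.count '<' : Int) + 1 := by push_cast; ring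
      rw [this, ih]
      simp
    · rw [if_neg hc, List.count_cons_of_ne (by simpa using hc)]
      exact ih

theorem parse_streamInv_step (a : Bool × List Char × Int) (b : Bool × List Char × Bool × Nat)
    (s : Char) (h : parse_streamInv a b) :
    parse_streamInv (parse_streamStepA a s) (parse_streamStepB b s) := by
  obtain ⟨a1, a2, a3⟩ := a
  obtain ⟨a1, b2, b3, b4⟩ := b
  obtain ⟨h1, h2, h3, h4, h5⟩ := h
  simp only at h1 h2 h3 h4 h5
  subst h1 h2 h3
  unfold parse_streamStepA parse_streamStepB parse_streamInv
  by_cases hi : a1 = true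
  · subst hi; simp_all
  · replace hi : a1 = false := by simpa using hi
    subst hi
    simp only [if_neg (by simp : ¬ (false = true))]
    by_cases hb : s = '!'
    · subst hb; simp_all
    by_cases hcb : s = '{' ∨ s = '}'
    · have hne : s ≠ '<' := by rcases hcb with h | h <;> subst h <;> decide
      rw [if_neg hb, if_pos hcb, if_neg hb, if_pos hcb]
      refine ⟨rfl, by simp, by simp [List.count_append, hne], ?_, ?_⟩
      · intro hg; simp [List.count_append, hne, h4 hg]
      · intro hg
        obtain ⟨p, q, hpq, hp, hm⟩ := h5 hg
        exact ⟨p, q ++ [s], by simp [hpq], hp, hm⟩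
    by_cases hlt : s = '<'
    · subst hlt
      rw [if_neg hb, if_neg hcb, if_pos rfl, if_neg hb, if_neg hcb, if_pos rfl]
      by_cases hg : b3 = true
      · subst hg
        obtain ⟨p, q, hpq, hp, hm⟩ := h5 rfl
        refine ⟨rfl, by simp, by simp [List.count_append], by simp, ?_⟩
        intro _
        exact ⟨p, q ++ ['<'], by simp [hpq], hp, hm⟩
      · replace hg : b3 = false := by simpa using hg
        subst hg
        have hc0 := h4 rfl
        simp only [if_neg (by simp : ¬ (false = true))]
        refine ⟨trivial, by simp, by simp [List.count_append, hc0], by simp, ?_⟩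
        intro _
        exact ⟨b2, [], by simp, hc0, rfl⟩
    by_cases hgt : s = '>'
    · subst hgt
      rw [if_neg hb, if_neg hcb, if_neg hlt, if_pos rfl, if_neg hb, if_neg hcb, if_neg hlt, if_pos rfl]
      by_cases hg : b3 = true
      · subst hg
        obtain ⟨p, q, hpq, hp, hm⟩ := h5 rfl
        subst hpq hm
        have hcount : (p ++ '<' :: q).count '<' = q.count '<' + 1 := by
          simp [List.count_append, hp]
        have hrev : (p ++ '<' :: q).reverse = q.reverse ++ '<' :: p.reverse := by simp
        have := parse_streamPopLoop_spec q.reverse p hp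
        rw [List.count_reverse] at this
        have heq : parse_streamPopLoop ((p ++ '<' :: q).reverse) (((p ++ '<' :: q).count '<' : Nat) : Int)
            = (p.reverse, 0) := by
          rw [hrev, hcount]; push_cast; exact_mod_cast this
        refine ⟨rfl, ?_, ?_, ?_, by simp⟩
        · simp only [heq]
          simp [List.take_append_of_le_length (le_refl p.length)]
        · simp only [heq]
          simp [List.take_append_of_le_length (le_refl p.length), hp]
        · intro _
          simp [List.take_append_of_le_length (le_refl p.length), hp]
      · replace hg : b3 = false := by simpa using hg
        subst hg
        have hc0 := h4 rfl
        simp only [if_neg (by simp : ¬ (false = true))]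
        rw [parse_streamPopLoop.eq_def]
        rw [if_neg (by simp [hc0])]
        exact ⟨trivial, rfl, by simp [hc0], fun _ => hc0, by simp⟩
    · rw [if_neg hb, if_neg hcb, if_neg hlt, if_neg hgt, if_neg hb, if_neg hcb, if_neg hlt, if_neg hgt]
      exact ⟨rfl, rfl, rfl, h4, h5⟩

theorem parse_streamInv_foldl (l : List Char) (a : Bool × List Char × Int)
    (b : Bool × List Char × Bool × Nat) (h : parse_streamInv a b) :
    parse_streamInv (l.foldl parse_streamStepA a) (l.foldl parse_streamStepB b) := by
  induction l generalizing a b with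
  | nil => exact h
  | cons c l ih => exact ih _ _ (parse_streamInv_step a b c h)

-- ===== VERDICT (by name: the statement is the Claim_ definition above) =====
theorem parse_stream_spec : Claim_equal_parse_stream := by
  intro stream _
  unfold Spec_parse_stream parse_stream parse_stream_alt
  have h := parse_streamInv_foldl stream.toList (false, [], 0) (false, [], false, 0)
    ⟨rfl, rfl, rfl, fun _ => rfl, by simp⟩
  obtain ⟨-, h2, -⟩ := h
  simp only [h2, List.reverse_reverse]
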